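-- pv_equiv track=rewrite | github.com/vijayroykargwal/Infy-FP | PF/Day9/src/problem31.py | sum_of_elements
-- ===== SOURCE A (Python) =====
-- def sum_of_elements(num_list,number):
--     result_sum = 0
--     new_num_list=[]
--     for i in range(0,len(num_list)):
--         if(num_list[i]==number):
--             if(i==0):
--                 new_num_list.append(num_list[i])
--                 new_num_list.append(num_list[i+1])
--
--             elif(i==len(num_list)-1):
--                 new_num_list.append(num_list[i])
--                 new_num_list.append(num_list[i-1])
--
--             else:
--                 new_num_list.append(num_list[i-1])
--                 new_num_list.append(num_list[i])
--                 new_num_list.append(num_list[i+1])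
--
--
--     for i in new_num_list:
--         if i in num_list:
--             num_list.remove(i)
--     if(len(num_list)!=0):
--         result_sum = sum(num_list)
--     else:
--         result_sum = 0
--
--     return result_sum
-- ===== SOURCE B (Python) =====
-- def sum_of_elements(num_list, number):
--     # Does not mutate num_list (A removes matched elements in place);
--     # equivalence is about the return value only.
--     n = len(num_list)
--     need = {}
--     for i, v in enumerate(num_list):
--         if v == number:
--             for j in (i - 1, i, i + 1):
--                 if 0 <= j < n:
--                     w = num_list[j]
--                     need[w] = need.get(w, 0) + 1
--     total = 0
--     for v in num_list:
--         c = need.get(v, 0)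
--         if c > 0:
--             need[v] = c - 1
--         else:
--             total += v
--     return total
-- ===== Notes on version B (the rewrite author's own statement) =====
-- stated objective: alternative
-- what changed: Replaces the append-then-list.remove/membership-scan removal phase (worst-case quadratic when many elements match) with a Counter-style dict of values to skip built in one pass over enumerate(num_list), followed by a single keep-scan that sums the elements not consumed by the counter; B also does not mutate num_list.
-- crash fix: A raises IndexError exactly when num_list == [number] (the single matching element looks up num_list[1]); B returns 0 there (nothing remains after removing the matched element). — e.g. on sum_of_elements([5], 5): A raises IndexError, B returns 0
import Mathlib
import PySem

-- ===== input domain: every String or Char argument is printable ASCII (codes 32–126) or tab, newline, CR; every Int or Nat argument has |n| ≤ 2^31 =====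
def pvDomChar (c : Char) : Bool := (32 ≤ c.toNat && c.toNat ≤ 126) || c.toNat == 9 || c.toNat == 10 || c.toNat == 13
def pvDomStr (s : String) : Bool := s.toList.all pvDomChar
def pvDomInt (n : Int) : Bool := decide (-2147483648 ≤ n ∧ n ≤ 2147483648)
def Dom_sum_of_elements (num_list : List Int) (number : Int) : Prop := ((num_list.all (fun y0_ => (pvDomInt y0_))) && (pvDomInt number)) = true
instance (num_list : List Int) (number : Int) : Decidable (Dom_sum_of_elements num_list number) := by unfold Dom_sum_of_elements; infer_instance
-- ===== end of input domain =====

-- B replaces A's remove-by-value phase with a one-pass counter of values to skip plus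
-- a single keep-scan (objective: alternative). A mutates num_list in place
-- (list.remove); B does not — the equivalence proved here is about the return value.

-- ===== PORT A =====
def sum_of_elements (num_list : List Int) (number : Int) : Int :=
  let new_num_list :=
    (PySem.List.pyRange 0 num_list.length 1).foldl (fun acc i =>
      if PySem.List.pyGetD num_list i 0 == number then
        if i == 0 then
          acc ++ [PySem.List.pyGetD num_list i 0, PySem.List.pyGetD num_list (i+1) 0]
        else if i == (num_list.length : Int) - 1 then
          acc ++ [PySem.List.pyGetD num_list i 0, PySem.List.pyGetD num_list (i-1) 0]
        else
          acc ++ [PySem.List.pyGetD num_list (i-1) 0, PySem.List.pyGetD num_list i 0,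
                  PySem.List.pyGetD num_list (i+1) 0]
      else acc) []
  let rest := new_num_list.foldl (fun acc i =>
      if acc.contains i then (PySem.List.remove? acc i).getD acc else acc) num_list
  if rest.length ≠ 0 then rest.sum else 0

-- ===== PORT B =====
def sum_of_elements_alt (num_list : List Int) (number : Int) : Int :=
  let n : Int := num_list.length
  let need : PySem.Dict Int Int :=
    (PySem.List.enumerate num_list).foldl (fun d p =>
      if p.2 == number then
        [p.1 - 1, p.1, p.1 + 1].foldl (fun d j =>
          if 0 ≤ j ∧ j < n then
            let w := PySem.List.pyGetD num_list j 0
            d.insert w (d.getD w 0 + 1)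
          else d) d
      else d) PySem.Dict.empty
  let res := num_list.foldl (fun (st : Int × PySem.Dict Int Int) v =>
      let c := st.2.getD v 0
      if c > 0 then (st.1, st.2.insert v (c - 1)) else (st.1 + v, st.2)) (0, need)
  res.1

-- ===== PRECONDITION & SPEC =====
-- Pre_ excludes exactly the inputs on which A raises IndexError: num_list = [number]
-- (the single matching element at i = 0 looks up num_list[i+1]).
def Pre_sum_of_elements (num_list : List Int) (number : Int) : Prop :=
  num_list ≠ [number]
instance (num_list : List Int) (number : Int) : Decidable (Pre_sum_of_elements num_list number) := by unfold Pre_sum_of_elements; infer_instance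
def pvWitness_sum_of_elements : List Int × Int := ([1, 2, 3], 2)

-- A raises IndexError exactly when num_list = [number]; B returns 0 there
-- (nothing remains after the matched element is removed).
def Raises_sum_of_elements (num_list : List Int) (number : Int) : Prop :=
  num_list = [number]
instance (num_list : List Int) (number : Int) : Decidable (Raises_sum_of_elements num_list number) := by unfold Raises_sum_of_elements; infer_instance
def pvRaiseWitness_sum_of_elements : List Int × Int := ([5], 5)
def pvRaiseWitnessOut_sum_of_elements : Int := 0

def Spec_sum_of_elements (num_list : List Int) (number : Int) (out : Int) : Prop := out = sum_of_elements_alt num_list number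
instance (num_list : List Int) (number : Int) (out : Int) : Decidable (Spec_sum_of_elements num_list number out) := by unfold Spec_sum_of_elements; infer_instance

-- ===== CLAIM (what is proved, stated in full; the proofs are below) =====
def Claim_equal_sum_of_elements : Prop := ∀ (num_list : List Int) (number : Int), Dom_sum_of_elements num_list number → Pre_sum_of_elements num_list number → Spec_sum_of_elements num_list number (sum_of_elements num_list number)
def Claim_raises_sum_of_elements : Prop := (∀ (num_list : List Int) (number : Int), Dom_sum_of_elements num_list number → Raises_sum_of_elements num_list number → ¬ Pre_sum_of_elements num_list number) ∧ (Dom_sum_of_elements (pvRaiseWitness_sum_of_elements.1) (pvRaiseWitness_sum_of_elements.2) ∧ Raises_sum_of_elements (pvRaiseWitness_sum_of_elements.1) (pvRaiseWitness_sum_of_elements.2) ∧ sum_of_elements_alt (pvRaiseWitness_sum_of_elements.1) (pvRaiseWitness_sum_of_elements.2) = pvRaiseWitnessOut_sum_of_elements)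

-- ===== LEMMAS AND PROOFS =====

-- the per-index chunk A appends to new_num_list
def pvChunkA (l : List Int) (num : Int) (i : Int) : List Int :=
  if PySem.List.pyGetD l i 0 = num then
    if i = 0 then [PySem.List.pyGetD l i 0, PySem.List.pyGetD l (i+1) 0]
    else if i = (l.length : Int) - 1 then
      [PySem.List.pyGetD l i 0, PySem.List.pyGetD l (i-1) 0]
    else [PySem.List.pyGetD l (i-1) 0, PySem.List.pyGetD l i 0, PySem.List.pyGetD l (i+1) 0]
  else []

-- the per-index values B counts into `need`
def pvChunkB (l : List Int) (num : Int) (p : Int × Int) : List Int :=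
  if p.2 = num then
    (([p.1 - 1, p.1, p.1 + 1].filter (fun j => decide (0 ≤ j ∧ j < (l.length : Int)))).map
      (fun j => PySem.List.pyGetD l j 0))
  else []

-- B's keep-scan step, let-free
def pvStep (st : Int × PySem.Dict Int Int) (v : Int) : Int × PySem.Dict Int Int :=
  if st.2.getD v 0 > 0 then (st.1, st.2.insert v (st.2.getD v 0 - 1)) else (st.1 + v, st.2)

theorem pv_foldl_nested {α β γ : Type} (xs : List α) (f : α → List β) (step : γ → β → γ)
    (init : γ) :
    xs.foldl (fun d a => (f a).foldl step d) init = (xs.flatMap f).foldl step init := by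
  induction xs generalizing init with
  | nil => simp
  | cons x xs ih => simp [List.flatMap_cons, List.foldl_append, ih]

theorem pv_foldl_filter_map {β γ : Type} (js : List Int) (P : Int → Prop) [DecidablePred P]
    (g : Int → β) (step : γ → β → γ) (d : γ) :
    js.foldl (fun d j => if P j then step d (g j) else d) d
      = ((js.filter (fun j => decide (P j))).map g).foldl step d := by
  induction js generalizing d with
  | nil => rfl
  | cons j js ih =>
    by_cases h : P j
    · simp [List.foldl_cons, h, ih]
    · simp [List.foldl_cons, h, ih]

theorem pv_count_flatMap_congr {α : Type} (xs : List α) (f g : α → List Int) (v : Int)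
    (h : ∀ a ∈ xs, (f a).count v = (g a).count v) :
    (xs.flatMap f).count v = (xs.flatMap g).count v := by
  induction xs with
  | nil => rfl
  | cons x xs ih =>
    simp only [List.flatMap_cons, List.count_append]
    rw [h x (by simp), ih (fun a ha => h a (by simp [ha]))]

-- A's second loop is exactly List.diff
theorem pv_removeFold (ws l : List Int) :
    ws.foldl (fun acc i => if acc.contains i then (PySem.List.remove? acc i).getD acc else acc) l
      = l.diff ws := by
  have hf : (fun (acc : List Int) (i : Int) =>
      if acc.contains i then (PySem.List.remove? acc i).getD acc else acc)
      = fun acc i => acc.erase i := by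
    funext acc i
    by_cases h : i ∈ acc
    · rw [if_pos (by simpa using h), PySem.List.remove?_eq_some_erase acc i h]; rfl
    · rw [if_neg (by simpa using h), List.erase_of_not_mem h]
  rw [hf, ← List.diff_eq_foldl]

-- A's first loop builds the flatMap of chunks
theorem pv_newA_eq (l : List Int) (num : Int) :
    ((PySem.List.pyRange 0 l.length 1).foldl (fun acc i =>
      if PySem.List.pyGetD l i 0 == num then
        if i == 0 then
          acc ++ [PySem.List.pyGetD l i 0, PySem.List.pyGetD l (i+1) 0]
        else if i == (l.length : Int) - 1 then
          acc ++ [PySem.List.pyGetD l i 0, PySem.List.pyGetD l (i-1) 0]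
        else
          acc ++ [PySem.List.pyGetD l (i-1) 0, PySem.List.pyGetD l i 0,
                  PySem.List.pyGetD l (i+1) 0]
      else acc) [])
    = (PySem.List.pyRange 0 l.length 1).flatMap (pvChunkA l num) := by
  have hf : (fun (acc : List Int) (i : Int) =>
      if PySem.List.pyGetD l i 0 == num then
        if i == 0 then
          acc ++ [PySem.List.pyGetD l i 0, PySem.List.pyGetD l (i+1) 0]
        else if i == (l.length : Int) - 1 then
          acc ++ [PySem.List.pyGetD l i 0, PySem.List.pyGetD l (i-1) 0]
        else
          acc ++ [PySem.List.pyGetD l (i-1) 0, PySem.List.pyGetD l i 0,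
                  PySem.List.pyGetD l (i+1) 0]
      else acc) = fun acc i => acc ++ pvChunkA l num i := by
    funext acc i
    simp only [pvChunkA, beq_iff_eq]
    split_ifs <;> simp
  rw [hf, PySem.List.foldl_append_eq_flatMap, List.nil_append]

theorem pv_A_eq (l : List Int) (num : Int) :
    sum_of_elements l num
      = (l.diff ((PySem.List.pyRange 0 l.length 1).flatMap (pvChunkA l num))).sum := by
  simp only [sum_of_elements]
  rw [pv_newA_eq, pv_removeFold]
  by_cases h : (l.diff ((PySem.List.pyRange 0 l.length 1).flatMap (pvChunkA l num))).length = 0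
  · rw [if_neg (by simpa using h)]
    rw [List.length_eq_zero_iff.mp h]; rfl
  · rw [if_pos h]

-- the keep-scan computes the sum of l.diff ws whenever the dict carries ws's counts
theorem pv_scan_sum (l : List Int) : ∀ (ws : List Int) (d : PySem.Dict Int Int) (t : Int),
    (∀ v, d.getD v 0 = (ws.count v : Int)) →
    (l.foldl pvStep (t, d)).1 = t + (l.diff ws).sum := by
  induction l with
  | nil => intro ws d t _; simp
  | cons x xs ih =>
    intro ws d t h
    simp only [List.foldl_cons, pvStep]
    by_cases hc : d.getD x 0 > 0
    · rw [if_pos hc]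
      have hx : x ∈ ws := by
        rw [h x] at hc
        exact List.count_pos_iff.mp (by exact_mod_cast hc)
      have hcnt : 0 < ws.count x := List.count_pos_iff.mpr hx
      have hd' : ∀ v, (d.insert x (d.getD x 0 - 1)).getD v 0 = ((ws.erase x).count v : Int) := by
        intro v
        rw [PySem.Dict.getD_insert]
        by_cases hv : v = x
        · rw [if_pos hv, hv, h x, List.count_erase]
          simp only [beq_self_eq_true, if_pos]
          omega
        · rw [if_neg hv, h v, List.count_erase]
          have : (x == v) = false := by simp [Ne.symm hv]
          rw [this]
          simp
      rw [ih (ws.erase x) _ t hd', List.cons_diff, if_pos hx]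
    · rw [if_neg hc]
      have hx : x ∉ ws := by
        intro hmem
        have := List.count_pos_iff.mpr hmem
        rw [h x] at hc
        omega
      rw [ih ws d (t + x) h, List.cons_diff, if_neg hx, List.sum_cons]
      ring

theorem pv_B_eq (l : List Int) (num : Int) :
    sum_of_elements_alt l num
      = (l.diff ((PySem.List.enumerate l).flatMap (pvChunkB l num))).sum := by
  simp only [sum_of_elements_alt]
  have houter : (fun (d : PySem.Dict Int Int) (p : Int × Int) =>
      if p.2 == num then
        [p.1 - 1, p.1, p.1 + 1].foldl (fun d j =>
          if 0 ≤ j ∧ j < (l.length : Int) then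
            d.insert (PySem.List.pyGetD l j 0) (d.getD (PySem.List.pyGetD l j 0) 0 + 1)
          else d) d
      else d)
      = fun d p => (pvChunkB l num p).foldl (fun d w => d.insert w (d.getD w 0 + 1)) d := by
    funext d p
    simp only [pvChunkB, beq_iff_eq]
    by_cases hp : p.2 = num
    · rw [if_pos hp, if_pos hp]
      exact pv_foldl_filter_map [p.1 - 1, p.1, p.1 + 1]
        (fun j => 0 ≤ j ∧ j < (l.length : Int)) (fun j => PySem.List.pyGetD l j 0)
        (fun d w => d.insert w (d.getD w 0 + 1)) d
    · rw [if_neg hp, if_neg hp]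
      rfl
  rw [houter, pv_foldl_nested, PySem.Dict.foldl_insert_getD_add_one_eq_counter]
  have := pv_scan_sum l ((PySem.List.enumerate l).flatMap (pvChunkB l num))
    (PySem.Dict.counter ((PySem.List.enumerate l).flatMap (pvChunkB l num))) 0
    (fun v => PySem.Dict.getD_counter _ v)
  simpa using this

theorem pv_chunk_count (l : List Int) (num : Int) (hpre : l ≠ [num]) (i : Int)
    (h0 : 0 ≤ i) (hl : i < (l.length : Int)) (v : Int) :
    (pvChunkB l num (i, PySem.List.pyGetD l i 0)).count v = (pvChunkA l num i).count v := by
  simp only [pvChunkA, pvChunkB]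
  by_cases hm : PySem.List.pyGetD l i 0 = num
  · rw [if_pos hm, if_pos hm]
    by_cases hi0 : i = 0
    · subst hi0
      rw [if_pos rfl]
      by_cases hlen : (l.length : Int) = 1
      · exfalso
        obtain ⟨a, rfl⟩ := List.length_eq_one_iff.mp (by exact_mod_cast hlen)
        rw [PySem.List.pyGetD_zero_cons] at hm
        exact hpre (by rw [hm])
      · have ha : ¬ (0 ≤ (0:Int) - 1 ∧ (0:Int) - 1 < (l.length : Int)) := by omega
        have hb : (0 ≤ (0:Int) ∧ (0:Int) < (l.length : Int)) := ⟨le_refl 0, by omega⟩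
        have hc : (0 ≤ (0:Int) + 1 ∧ (0:Int) + 1 < (l.length : Int)) := by omega
        have hn0 : 0 < l.length := by omega
        have hn1 : 1 < l.length := by omega
        simp [hn0, hn1]
    · rw [if_neg hi0]
      by_cases hil : i = (l.length : Int) - 1
      · rw [if_pos hil]
        have ha : (0 ≤ i - 1 ∧ i - 1 < (l.length : Int)) := by omega
        have hb : (0 ≤ i ∧ i < (l.length : Int)) := ⟨h0, hl⟩
        have hc : ¬ (0 ≤ i + 1 ∧ i + 1 < (l.length : Int)) := by omega
        simp only [List.filter_cons, List.filter_nil, ha, hb, hc, decide_false,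
          decide_eq_true_eq]
        simp [List.count_cons]
        omega
      · rw [if_neg hil]
        have ha : (0 ≤ i - 1 ∧ i - 1 < (l.length : Int)) := by omega
        have hb : (0 ≤ i ∧ i < (l.length : Int)) := ⟨h0, hl⟩
        have hc : (0 ≤ i + 1 ∧ i + 1 < (l.length : Int)) := by omega
        have h1i : 1 ≤ i := by omega
        simp [ha, hb, hc, h1i]
  · rw [if_neg hm, if_neg hm]

theorem pv_perm (l : List Int) (num : Int) (hpre : l ≠ [num]) :
    ((PySem.List.enumerate l).flatMap (pvChunkB l num)).Perm
      ((PySem.List.pyRange 0 l.length 1).flatMap (pvChunkA l num)) := by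
  rw [List.perm_iff_count]
  intro v
  rw [PySem.List.enumerate_eq_map_pyRange l 0, List.flatMap_map]
  have hlen : PySem.List.len l = (l.length : Int) := by simp [PySem.List.len]
  rw [hlen]
  exact pv_count_flatMap_congr _ _ _ v (fun i hi => by
    have hmem := PySem.List.mem_pyRange_one.mp hi
    exact pv_chunk_count l num hpre i hmem.1 hmem.2 v)

-- ===== VERDICT (by name: the statement is the Claim_ definition above) =====
theorem sum_of_elements_spec : Claim_equal_sum_of_elements := by
  intro l num _ hpre
  unfold Spec_sum_of_elements
  rw [pv_A_eq, pv_B_eq, List.Perm.diff_left l (pv_perm l num hpre)]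

theorem sum_of_elements_raises : Claim_raises_sum_of_elements := by
  unfold Claim_raises_sum_of_elements
  exact ⟨fun l n _ hr hp => hp hr, by decide⟩

-- self-check: at the raise witness B indeed returns the stated value
theorem pv_raise_witness_ok :
    sum_of_elements_alt pvRaiseWitness_sum_of_elements.1 pvRaiseWitness_sum_of_elements.2
      = pvRaiseWitnessOut_sum_of_elements :=
  sum_of_elements_raises.2.2.2
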